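-- pv_equiv track=rewrite | github.com/MrHumanRebel/sze_python_programozas | mintavizsga/py/nba_games_2021_05_13.py | bigram
-- ===== SOURCE A (Python) =====
-- def bigram(data):
--     data = data.lower()
--     bigram = []
--     str = ""
--     for i  in range(len(data)):
--         if len(str) == 2:
--             bigram.append(str)
--             str = ""
--             str += data[i]
--         else:
--             str += data[i]
--         if i == len(data) - 1:
--             bigram.append(str)
--     return bigram
-- ===== SOURCE B (Python) =====
-- def bigram(data):
--     data = data.lower()
--     out = []
--     i = 0
--     while i < len(data):
--         out.append(data[i:i+2])
--         i += 2
--     return out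
-- ===== Notes on version B (the rewrite author's own statement) =====
-- stated objective: simpler
-- what changed: B iterates over chunk start positions and slices data[i:i+2], replacing A's per-character loop with a stateful buffer and an end-of-string flush special case.
import Mathlib
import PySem

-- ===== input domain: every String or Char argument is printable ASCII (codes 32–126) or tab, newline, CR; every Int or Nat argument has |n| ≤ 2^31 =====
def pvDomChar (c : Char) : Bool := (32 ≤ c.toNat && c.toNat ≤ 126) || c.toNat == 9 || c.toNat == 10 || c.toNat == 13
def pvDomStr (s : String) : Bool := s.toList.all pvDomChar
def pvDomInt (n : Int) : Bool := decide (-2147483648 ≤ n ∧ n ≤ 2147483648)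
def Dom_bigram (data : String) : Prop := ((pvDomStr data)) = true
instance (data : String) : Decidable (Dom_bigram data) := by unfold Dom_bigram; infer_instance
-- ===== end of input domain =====

-- B replaces A's per-character loop (with a 2-char buffer and end-of-string flush) by a loop
-- over chunk start positions taking the slice data[i:i+2]; objective: simpler.

-- ===== PORT A =====
-- one iteration of A's for-loop: flush the buffer when full, append data[i], flush at the last index
def stepA (d : List Char) (st : List String × List Char) (i : Nat) : List String × List Char :=
  let p :=
    if st.2.length == 2 then (st.1 ++ [String.ofList st.2], [d.getD i ' '])
    else (st.1, st.2 ++ [d.getD i ' '])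
  if i == d.length - 1 then (p.1 ++ [String.ofList p.2], p.2) else p

def bigram (data : String) : List String :=
  let d := PySem.Chars.lower data.toList
  ((List.range d.length).foldl (stepA d) ([], [])).1

-- ===== PORT B =====
-- while i < len(data): out.append(data[i:i+2]); i += 2
def bigramAltGo (d : List Char) (i : Nat) : List String :=
  if i < d.length then
    String.ofList (PySem.List.slice d (some (i : Int)) (some ((i : Int) + 2))) :: bigramAltGo d (i + 2)
  else []
termination_by d.length - i

def bigram_alt (data : String) : List String :=
  let d := PySem.Chars.lower data.toList
  bigramAltGo d 0

-- ===== PRECONDITION & SPEC =====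
def Spec_bigram (data : String) (out : List String) : Prop := out = bigram_alt data
instance (data : String) (out : List String) : Decidable (Spec_bigram data out) := by unfold Spec_bigram; infer_instance

-- ===== CLAIM (what is proved, stated in full; the proofs are below) =====
def Claim_equal_bigram : Prop := ∀ (data : String), Dom_bigram data → Spec_bigram data (bigram data)

-- ===== LEMMAS AND PROOFS =====

-- the common characterisation: both programs chunk the lowered character list into pairs
def chunksC : List Char → List (List Char)
  | [] => []
  | [a] => [[a]]
  | a :: b :: r => [a, b] :: chunksC r

theorem chunksC_len1 (cs : List Char) (h : cs.length = 1) : chunksC cs = [cs] := by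
  match cs, h with
  | [a], _ => rfl

theorem chunksC_len2 (cs : List Char) (h : cs.length = 2) : chunksC cs = [cs] := by
  match cs, h with
  | [a, b], _ => rfl

theorem chunksC_len3 (cs : List Char) (h : cs.length = 3) :
    chunksC cs = [cs.take 2, cs.drop 2] := by
  match cs, h with
  | [a, b, c], _ => rfl

theorem chunksC_append (cs ds : List Char) (h : cs.length % 2 = 0) :
    chunksC (cs ++ ds) = chunksC cs ++ chunksC ds := by
  induction cs using chunksC.induct with
  | case1 => rfl
  | case2 a => simp at h
  | case3 a b r ih =>
    simp only [List.length_cons] at h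
    simp only [List.cons_append, chunksC, List.cons_append]
    rw [ih (by omega)]

-- B's loop computes chunksC of the remaining suffix
theorem bigramAltGo_eq (d : List Char) (i : Nat) :
    bigramAltGo d i = (chunksC (d.drop i)).map String.ofList := by
  rw [bigramAltGo]
  split
  · rename_i h
    have hs : PySem.List.slice d (some (i : Int)) (some ((i : Int) + 2)) = (d.drop i).take 2 :=
      PySem.List.slice_natCast_add d i 2
    rw [hs, bigramAltGo_eq d (i + 2)]
    have hdd : d.drop (i + 2) = (d.drop i).drop 2 := by rw [List.drop_drop]
    rw [hdd]
    rcases hdi : d.drop i with _ | ⟨a, rest⟩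
    · exfalso; have := List.length_drop (l := d) (i := i); rw [hdi] at this; simp at this; omega
    · rcases rest with _ | ⟨b, r⟩
      · simp [chunksC]
      · simp [chunksC]
  · rename_i h
    rw [List.drop_eq_nil_of_le (by omega)]
    rfl
termination_by d.length - i

theorem take_succ_getD (d : List Char) (k : Nat) (h : k < d.length) :
    d.take (k + 1) = d.take k ++ [d.getD k ' '] := by
  rw [List.take_add_one, List.getElem?_eq_getElem h, List.getD_eq_getElem d ' ' h]
  rfl

theorem drop_last_getD (d : List Char) (k : Nat) (h : k + 1 = d.length) :
    d.drop k = [d.getD k ' '] := by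
  rw [List.drop_eq_getElem_cons (by omega), List.drop_eq_nil_of_le (by omega),
    List.getD_eq_getElem d ' ' (by omega)]

theorem take_split (d : List Char) (k m : Nat) (hm : m ≤ k) :
    d.take k = d.take m ++ (d.take k).drop m := by
  conv_lhs => rw [← List.take_append_drop m (d.take k)]
  rw [List.take_take, Nat.min_eq_left hm]

-- A's loop invariant: before the last index, the state is the finished chunks plus the buffer
theorem foldA_inv (d : List Char) (k : Nat) (h1 : 1 ≤ k) (h2 : k ≤ d.length - 1) :
    (List.range k).foldl (stepA d) ([], []) =
      ((chunksC (d.take (2 * ((k - 1) / 2)))).map String.ofList,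
        (d.take k).drop (2 * ((k - 1) / 2))) := by
  induction k with
  | zero => omega
  | succ k ih =>
    rcases Nat.eq_zero_or_pos k with hk0 | hk1
    · subst hk0
      have hlen : 2 ≤ d.length := by omega
      have hnl : ((0 : Nat) == d.length - 1) = false := by
        simp only [beq_eq_false_iff_ne]; omega
      have ht1 : d.take 1 = [d.getD 0 ' '] := by
        rw [take_succ_getD d 0 (by omega)]; rfl
      simp [stepA, hnl, ht1]
      rfl
    · have hk : k ≤ d.length - 1 := by omega
      have hkd : k < d.length - 1 := by omega
      rw [List.range_succ, List.foldl_append, List.foldl_cons, List.foldl_nil, ih hk1 hk]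
      have hnl : (k == d.length - 1) = false := by
        simp only [beq_eq_false_iff_ne]; omega
      rcases Nat.even_or_odd k with ⟨j, hj⟩ | ⟨j, hj⟩
      · -- k even (k ≥ 2): the buffer is full, A flushes it and restarts with d[k]
        have hm : 2 * ((k - 1) / 2) = k - 2 := by omega
        have hm' : 2 * ((k + 1 - 1) / 2) = k := by omega
        have hfull : (((d.take k).drop (k - 2)).length == 2) = true := by
          simp only [beq_iff_eq, List.length_drop, List.length_take]; omega
        simp only [stepA, hm, hm', hfull, if_true, hnl, Bool.false_eq_true, if_false,
          Prod.mk.injEq]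
        refine ⟨?_, ?_⟩
        · have hsplit : chunksC (d.take k) =
              chunksC (d.take (k - 2)) ++ [(d.take k).drop (k - 2)] := by
            conv_lhs => rw [take_split d k (k - 2) (by omega)]
            rw [chunksC_append _ _ (by rw [List.length_take]; omega),
              chunksC_len2 ((d.take k).drop (k - 2)) (by rw [List.length_drop, List.length_take]; omega)]
          rw [hsplit]; simp
        · rw [take_succ_getD d k (by omega),
            List.drop_append_of_le_length (by rw [List.length_take]; omega),
            List.drop_eq_nil_of_le (by rw [List.length_take]; omega)]
          rfl
      · -- k odd: the buffer has one character, A appends d[k]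
        have hm : 2 * ((k - 1) / 2) = k - 1 := by omega
        have hm' : 2 * ((k + 1 - 1) / 2) = k - 1 := by omega
        have hfull : (((d.take k).drop (k - 1)).length == 2) = true → False := by
          simp only [beq_iff_eq, List.length_drop, List.length_take]; omega
        simp only [stepA, hm, hm', Bool.eq_false_iff.mpr hfull, Bool.false_eq_true, if_false,
          hnl, Prod.mk.injEq]
        refine ⟨by trivial, ?_⟩
        rw [take_succ_getD d k (by omega),
          List.drop_append_of_le_length (by rw [List.length_take]; omega)]

theorem bigram_eq_chunks (d : List Char) :
    ((List.range d.length).foldl (stepA d) ([], [])).1 = (chunksC d).map String.ofList := by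
  rcases hn : d.length with _ | n
  · have : d = [] := List.eq_nil_of_length_eq_zero hn
    subst this; rfl
  have hlast : (n == d.length - 1) = true := by simp only [beq_iff_eq]; omega
  rcases Nat.eq_zero_or_pos n with h1 | h2
  · -- single character: the first iteration is also the last and flushes
    subst h1
    have hd : d = [d.getD 0 ' '] := by
      conv_lhs => rw [← List.take_length (l := d), hn, take_succ_getD d 0 (by omega)]
      rfl
    rw [chunksC_len1 d hn]
    simp [stepA, hlast]
    conv_rhs => rw [hd]
    simp [List.getD]
  · -- at least two characters: use the invariant at n, then the flushing last step
    rw [List.range_succ, List.foldl_append, List.foldl_cons, List.foldl_nil,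
      foldA_inv d n h2 (by omega)]
    rcases Nat.even_or_odd n with ⟨j, hj⟩ | ⟨j, hj⟩
    · -- n even, so the length n+1 is odd, j ≥ 1: flush the pair, then the lone last char
      rcases Nat.eq_zero_or_pos j with hj0 | hj2
      · omega
      have hm : 2 * ((n - 1) / 2) = n - 2 := by omega
      have hfull : (((d.take n).drop (n - 2)).length == 2) = true := by
        simp only [beq_iff_eq, List.length_drop, List.length_take]; omega
      simp only [stepA, hm, hfull, if_true, hlast]
      have hdt : (d.take n).drop (n - 2) = (d.drop (n - 2)).take 2 := by
        rw [List.drop_take]; congr 1; omega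
      have hlast2 : (d.drop (n - 2)).drop 2 = [d.getD n ' '] := by
        rw [List.drop_drop]
        have h22 : n - 2 + 2 = n := by omega
        rw [h22, drop_last_getD d n (by omega)]
      have hsplit : chunksC d =
          chunksC (d.take (n - 2)) ++ [(d.drop (n - 2)).take 2, (d.drop (n - 2)).drop 2] := by
        conv_lhs => rw [← List.take_append_drop (n - 2) d]
        rw [chunksC_append _ _ (by rw [List.length_take]; omega),
          chunksC_len3 (d.drop (n - 2)) (by rw [List.length_drop]; omega)]
      rw [hsplit, hdt, hlast2]; simp
    · -- n odd, so the length n+1 is even: the last step completes the final pair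
      have hm : 2 * ((n - 1) / 2) = n - 1 := by omega
      have hfull : (((d.take n).drop (n - 1)).length == 2) = true → False := by
        simp only [beq_iff_eq, List.length_drop, List.length_take]; omega
      simp only [stepA, hm, Bool.eq_false_iff.mpr hfull, Bool.false_eq_true, if_false,
        hlast, if_true]
      have hdt : (d.take n).drop (n - 1) ++ [d.getD n ' '] = d.drop (n - 1) := by
        rw [List.drop_take]
        have h2' : n - (n - 1) = 1 := by omega
        rw [h2']
        have h3 : (d.drop (n - 1)).take 1 ++ (d.drop (n - 1)).drop 1 = d.drop (n - 1) :=
          List.take_append_drop 1 _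
        have h4 : (d.drop (n - 1)).drop 1 = d.drop n := by
          rw [List.drop_drop]; congr 1; omega
        conv_rhs => rw [← h3]
        rw [h4, drop_last_getD d n (by omega)]
      have hsplit : chunksC d = chunksC (d.take (n - 1)) ++ [d.drop (n - 1)] := by
        conv_lhs => rw [← List.take_append_drop (n - 1) d]
        rw [chunksC_append _ _ (by rw [List.length_take]; omega),
          chunksC_len2 (d.drop (n - 1)) (by rw [List.length_drop]; omega)]
      rw [hsplit, ← hdt]; simp

-- ===== VERDICT (by name: the statement is the Claim_ definition above) =====
theorem bigram_spec : Claim_equal_bigram := by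
  intro data _
  unfold Spec_bigram bigram bigram_alt
  rw [bigram_eq_chunks, bigramAltGo_eq, List.drop_zero]
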